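-- pv_equiv track=rewrite | github.com/rishabhjain02/Data-Structures-And-Algorithms | Array/Closest_MinMax.py | solve
-- ===== SOURCE A (Python) =====
-- def solve(A):
--     max_value = max(A)
--     min_value = min(A)
--     last_min = -1
--     last_max = -1
--     ans = len(A)
--
--     for i in range(len(A)):
--         if A[i] == max_value:
--             if last_min != -1:
--                 ans = min(ans, i-last_min+1)
--             last_max = i
--
--         if A[i] == min_value:
--             if last_max != -1:
--                 ans = min(ans, i-last_max+1)
--             last_min = i
--     return ans
-- ===== SOURCE B (Python) =====
-- def solve(A):
--     mn = min(A)
--     mx = max(A)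
--     min_pos = [i for i, x in enumerate(A) if x == mn]
--     max_pos = [i for i, x in enumerate(A) if x == mx]
--     ans = len(A)
--     i = j = 0
--     while i < len(min_pos) and j < len(max_pos):
--         ans = min(ans, abs(min_pos[i] - max_pos[j]) + 1)
--         if min_pos[i] < max_pos[j]:
--             i += 1
--         else:
--             j += 1
--     return ans
-- ===== Notes on version B (the rewrite author's own statement) =====
-- stated objective: alternative
-- what changed: Replaces A's single online scan with last-seen min/max sentinels by first building the two sorted index lists of min- and max-occurrences and then running a two-pointer merge over them.
import Mathlib
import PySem

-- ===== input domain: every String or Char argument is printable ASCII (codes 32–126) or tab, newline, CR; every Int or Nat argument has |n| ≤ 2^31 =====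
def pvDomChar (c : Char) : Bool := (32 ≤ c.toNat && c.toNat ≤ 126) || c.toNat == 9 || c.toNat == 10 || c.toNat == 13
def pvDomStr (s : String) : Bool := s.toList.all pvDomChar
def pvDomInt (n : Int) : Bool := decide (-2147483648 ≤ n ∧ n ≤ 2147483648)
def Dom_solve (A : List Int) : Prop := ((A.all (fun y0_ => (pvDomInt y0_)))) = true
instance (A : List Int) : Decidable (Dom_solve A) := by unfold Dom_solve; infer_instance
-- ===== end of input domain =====

-- B replaces A's online last-seen scan by occurrence-index tables plus a two-pointer merge (alternative structure, same O(n) cost).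

-- ===== PORT A =====
-- one loop iteration of A: state is (last_min, last_max, ans), input is (i, A[i])
def stepA (w v : Int) (st : Int × Int × Int) (p : Int × Int) : Int × Int × Int :=
  let lmin := st.1
  let lmax := st.2.1
  let ans := st.2.2
  let ans1 := if p.2 = w then (if lmin ≠ -1 then min ans (p.1 - lmin + 1) else ans) else ans
  let lmax1 := if p.2 = w then p.1 else lmax
  let ans2 := if p.2 = v then (if lmax1 ≠ -1 then min ans1 (p.1 - lmax1 + 1) else ans1) else ans1
  let lmin1 := if p.2 = v then p.1 else lmin
  (lmin1, lmax1, ans2)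


def solve (A : List Int) : Int :=
  match PySem.List.max? A (fun y => y), PySem.List.min? A (fun y => y) with
  | some w, some v =>
      ((PySem.List.pyRange 0 (PySem.List.len A) 1).foldl
        (fun st i => stepA w v st (i, PySem.List.pyGetD A i 0))
        (-1, -1, (A.length : Int))).2.2
  | _, _ => 0  -- unreachable under Pre_solve (Python raises ValueError on [])

-- ===== PORT B =====
-- [i for i, x in enumerate(A) if x == val]
def posList (val : Int) (A : List Int) : List Int :=
  ((PySem.List.enumerate A 0).filter (fun p => p.2 == val)).map (fun p => p.1)

-- the while loop with the two pointers, as structural recursion on the two index lists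
def mergeB (ps qs : List Int) (ans : Int) : Int :=
  match ps, qs with
  | a :: ps', b :: qs' =>
      if a < b then mergeB ps' (b :: qs') (min ans (|a - b| + 1))
      else mergeB (a :: ps') qs' (min ans (|a - b| + 1))
  | _, _ => ans


def solve_alt (A : List Int) : Int :=
  match PySem.List.min? A (fun y => y) with
  | none => 0  -- unreachable under Pre_solve
  | some v =>
    match PySem.List.max? A (fun y => y) with
    | none => 0
    | some w => mergeB (posList v A) (posList w A) (A.length : Int)

-- ===== PRECONDITION & SPEC =====
-- Pre_ excludes only the empty list, on which Python's max(A)/min(A) raises ValueError (in A and in B alike).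
def Pre_solve (A : List Int) : Prop := A ≠ []
instance (A : List Int) : Decidable (Pre_solve A) := by unfold Pre_solve; infer_instance

def pvWitness_solve : List Int := ([3, 1, 3, 2] : List Int)

def Spec_solve (A : List Int) (out : Int) : Prop := out = solve_alt A
instance (A : List Int) (out : Int) : Decidable (Spec_solve A out) := by unfold Spec_solve; infer_instance

-- ===== CLAIM (what is proved, stated in full; the proofs are below) =====
def Claim_equal_solve : Prop := ∀ (A : List Int), Dom_solve A → Pre_solve A → Spec_solve A (solve A)

-- ===== LEMMAS AND PROOFS =====

def optL (t : Int) : List Int := if t = -1 then [] else [t]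

def pos (val : Int) (xs : List Int) (s : Int) : List Int :=
  match xs with
  | [] => []
  | x :: t => if x = val then s :: pos val t (s + 1) else pos val t (s + 1)

lemma mem_optL (i t : Int) : i ∈ optL t ↔ t ≠ -1 ∧ i = t := by
  unfold optL; split <;> simp_all

lemma pos_ge (val : Int) (xs : List Int) (s : Int) :
    ∀ i ∈ pos val xs s, s ≤ i := by
  induction xs generalizing s with
  | nil => simp [pos]
  | cons x t ih =>
      intro i hi
      unfold pos at hi
      split at hi
      · rw [List.mem_cons] at hi
        rcases hi with rfl | hi
        · omega
        · have := ih (s + 1) i hi; omega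
      · have := ih (s + 1) i hi; omega


lemma self_mem_optL_append (t : Int) (l : List Int) (h : t ≠ -1) : t ∈ optL t ++ l := by
  simp [mem_optL, h]

lemma head_mem_append_cons (a : Int) (l1 l2 : List Int) : a ∈ l1 ++ a :: l2 :=
  List.mem_append_right _ List.mem_cons_self

lemma pos_cons (val x : Int) (t : List Int) (s : Int) :
    pos val (x :: t) s = if x = val then s :: pos val t (s + 1) else pos val t (s + 1) := rfl

lemma pos_sorted (val : Int) (xs : List Int) (s : Int) :
    (pos val xs s).Pairwise (· < ·) := by
  induction xs generalizing s with
  | nil => simp [pos]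
  | cons x t ih =>
      rw [pos_cons]
      split
      · exact List.Pairwise.cons (fun i hi => by have := pos_ge val t (s + 1) i hi; omega) (ih (s + 1))
      · exact ih (s + 1)

lemma posList_eq (val : Int) (xs : List Int) (s : Int) :
    ((PySem.List.enumerate xs s).filter (fun p => p.2 == val)).map (fun p => p.1)
      = pos val xs s := by
  induction xs generalizing s with
  | nil => simp [pos, PySem.List.enumerate]
  | cons x t ih =>
      rw [PySem.List.enumerate_cons, pos_cons]
      by_cases h : x = val
      · simp [h, ih]
      · simp [h, ih]

lemma mergeB_le_init (ps qs : List Int) (ans : Int) : mergeB ps qs ans ≤ ans := by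
  fun_induction mergeB ps qs ans with
  | case1 ans a ps' b qs' h ih => omega
  | case2 ans a ps' b qs' h ih => omega
  | case3 ps qs ans h => omega

lemma mergeB_le_pair (ps qs : List Int) (ans i j : Int)
    (hp : ps.Pairwise (· < ·)) (hq : qs.Pairwise (· < ·))
    (hi : i ∈ ps) (hj : j ∈ qs) : mergeB ps qs ans ≤ |i - j| + 1 := by
  induction ps, qs, ans using mergeB.induct with
  | case1 ans a ps' b qs' hab ih =>
      simp only [mergeB]; rw [if_pos hab]
      rcases List.mem_cons.mp hi with rfl | hi'
      · have hbj : b ≤ j := by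
          rcases List.mem_cons.mp hj with rfl | hj'
          · omega
          · exact le_of_lt (List.rel_of_pairwise_cons hq hj')
        have h1 := mergeB_le_init ps' (b :: qs') (min ans (|i - b| + 1))
        have h2 : |i - b| + 1 ≤ |i - j| + 1 := by
          rw [abs_of_neg (by omega : i - b < 0), abs_of_neg (by omega : i - j < 0)]; omega
        omega
      · exact ih hp.tail hq hi' hj
  | case2 ans a ps' b qs' hab ih =>
      simp only [mergeB]; rw [if_neg hab]
      rcases List.mem_cons.mp hj with rfl | hj'
      · have hai : a ≤ i := by
          rcases List.mem_cons.mp hi with rfl | hi'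
          · omega
          · exact le_of_lt (List.rel_of_pairwise_cons hp hi')
        have hba : j ≤ a := by omega
        have h1 := mergeB_le_init (a :: ps') qs' (min ans (|a - j| + 1))
        have h2 : |a - j| + 1 ≤ |i - j| + 1 := by
          rw [abs_of_nonneg (by omega : (0:Int) ≤ a - j), abs_of_nonneg (by omega : (0:Int) ≤ i - j)]; omega
        omega
      · exact ih hp hq.tail hi hj'
  | case3 ps qs ans h =>
      rcases ps with _ | ⟨a, ps'⟩
      · simp at hi
      · rcases qs with _ | ⟨b, qs'⟩
        · simp at hj
        · exact (h a ps' b qs' rfl rfl).elim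

lemma le_mergeB (ps qs : List Int) (ans c : Int)
    (h1 : c ≤ ans) (h2 : ∀ i ∈ ps, ∀ j ∈ qs, c ≤ |i - j| + 1) :
    c ≤ mergeB ps qs ans := by
  induction ps, qs, ans using mergeB.induct with
  | case1 ans a ps' b qs' hab ih =>
      simp only [mergeB]; rw [if_pos hab]
      have := h2 a (by simp) b (by simp)
      exact ih (by omega) (fun i hi j hj => h2 i (by simp [hi]) j hj)
  | case2 ans a ps' b qs' hab ih =>
      simp only [mergeB]; rw [if_neg hab]
      have := h2 a (by simp) b (by simp)
      exact ih (by omega) (fun i hi j hj => h2 i hi j (by simp [hj]))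
  | case3 ps qs ans h =>
      rcases ps with _ | ⟨a, ps'⟩
      · simpa [mergeB]
      · rcases qs with _ | ⟨b, qs'⟩
        · simpa [mergeB]
        · exact (h a ps' b qs' rfl rfl).elim

lemma scan_le_iff (w v : Int) (xs : List Int) (s lmin lmax ans c : Int)
    (h1 : lmin < s) (h2 : lmax < s) (h3 : -1 ≤ lmin) (h4 : -1 ≤ lmax)
    (hinv : lmin ≠ -1 → lmax ≠ -1 → ans ≤ |lmin - lmax| + 1) :
    (c ≤ ((PySem.List.enumerate xs s).foldl (stepA w v) (lmin, lmax, ans)).2.2) ↔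
      (c ≤ ans ∧ ∀ i ∈ optL lmin ++ pos v xs s, ∀ j ∈ optL lmax ++ pos w xs s,
        c ≤ |i - j| + 1) := by
  induction xs generalizing s lmin lmax ans with
  | nil =>
      simp only [PySem.List.enumerate, List.foldl_nil, pos, List.append_nil]
      constructor
      · intro h
        refine ⟨h, fun i hi j hj => ?_⟩
        rw [mem_optL] at hi hj
        obtain ⟨hm, rfl⟩ := hi; obtain ⟨hx, rfl⟩ := hj
        exact le_trans h (hinv hm hx)
      · exact fun h => h.1
  | cons x t ih =>
      have hs : (0:Int) ≤ s := by omega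
      rw [PySem.List.enumerate_cons, List.foldl_cons]
      by_cases hw : x = w <;> by_cases hv : x = v
      · -- x == max_value and x == min_value (so the two sentinels both move to s)
        subst hw; subst hv
        have hstep : stepA x x (lmin, lmax, ans) (s, x) =
            (s, s, min (if lmin = -1 then ans else min ans (s - lmin + 1)) 1) := by
          simp [stepA, show ¬s = -1 by omega]
        rw [hstep,
          ih (s + 1) s s _ (by omega) (by omega) (by omega) (by omega)
            (by intro _ _; simp)]
        rw [pos_cons, if_pos rfl]
        constructor
        · rintro ⟨hc, -⟩
          exact ⟨by omega, fun i _ j _ => by have := abs_nonneg (i - j); omega⟩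
        · rintro ⟨hc, hp⟩
          have hss : c ≤ 1 := by
            have := hp s (head_mem_append_cons s _ _) s (head_mem_append_cons s _ _)
            simpa using this
          have hlm : ¬lmin = -1 → c ≤ s - lmin + 1 := by
            intro hm
            have := hp lmin (self_mem_optL_append lmin _ hm) s (head_mem_append_cons s _ _)
            rwa [abs_of_neg (by omega : lmin - s < 0), neg_sub] at this
          refine ⟨by split_ifs with h' <;> omega, fun i hi j hj => ?_⟩
          refine hp i ?_ j ?_
          · simp only [mem_optL, List.mem_append, List.mem_cons] at hi ⊢
            rcases hi with ⟨-, rfl⟩ | hi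
            · exact Or.inr (Or.inl rfl)
            · exact Or.inr (Or.inr hi)
          · simp only [mem_optL, List.mem_append, List.mem_cons] at hj ⊢
            rcases hj with ⟨-, rfl⟩ | hj
            · exact Or.inr (Or.inl rfl)
            · exact Or.inr (Or.inr hj)
      · -- x == max_value only: last_max moves to s
        subst hw
        have hstep : stepA x v (lmin, lmax, ans) (s, x) =
            (lmin, s, if lmin = -1 then ans else min ans (s - lmin + 1)) := by
          simp [stepA, hv]
        rw [hstep,
          ih (s + 1) lmin s _ (by omega) (by omega) (by omega) (by omega)
            (by intro hm _; rw [abs_of_neg (by omega : lmin - s < 0)]; split_ifs with h' <;> omega)]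
        rw [pos_cons, if_neg hv, pos_cons, if_pos rfl]
        constructor
        · rintro ⟨hc, hp⟩
          refine ⟨by split_ifs at hc <;> omega, fun i hi j hj => ?_⟩
          simp only [mem_optL, List.mem_append, List.mem_cons] at hi hj
          rcases hj with ⟨hx, rfl⟩ | hj
          · -- j = lmax: dominated by the pair (i, s) (or by hinv when i = lmin)
            rcases hi with ⟨hm, rfl⟩ | hi
            · have := hinv hm hx
              split_ifs at hc <;> omega
            · have hge := pos_ge v t (s + 1) i hi
              have := hp i (by simp [hi]) s (self_mem_optL_append s _ (by omega))
              rw [abs_of_nonneg (by omega : (0:Int) ≤ i - s)] at this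
              rw [abs_of_nonneg (by omega : (0:Int) ≤ i - j)]
              omega
          · refine hp i ?_ j ?_
            · simp only [mem_optL, List.mem_append]
              rcases hi with ⟨hm, rfl⟩ | hi
              · exact Or.inl ⟨hm, rfl⟩
              · exact Or.inr hi
            · simp only [mem_optL, List.mem_append]
              rcases hj with rfl | hj
              · exact Or.inl ⟨by omega, rfl⟩
              · exact Or.inr hj
        · rintro ⟨hc, hp⟩
          have hlm : ¬lmin = -1 → c ≤ s - lmin + 1 := by
            intro hm
            have := hp lmin (self_mem_optL_append lmin _ hm) s (head_mem_append_cons s _ _)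
            rwa [abs_of_neg (by omega : lmin - s < 0), neg_sub] at this
          refine ⟨by split_ifs with h' <;> omega, fun i hi j hj => ?_⟩
          refine hp i ?_ j ?_
          · simp only [mem_optL, List.mem_append] at hi ⊢
            exact hi
          · simp only [mem_optL, List.mem_append, List.mem_cons] at hj ⊢
            rcases hj with ⟨-, rfl⟩ | hj
            · exact Or.inr (Or.inl rfl)
            · exact Or.inr (Or.inr hj)
      · -- x == min_value only: last_min moves to s
        subst hv
        have hstep : stepA w x (lmin, lmax, ans) (s, x) =
            (s, lmax, if lmax = -1 then ans else min ans (s - lmax + 1)) := by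
          simp [stepA, hw]
        rw [hstep,
          ih (s + 1) s lmax _ (by omega) (by omega) (by omega) (by omega)
            (by intro _ hx; rw [abs_of_nonneg (by omega : (0:Int) ≤ s - lmax)]; split_ifs with h' <;> omega)]
        rw [pos_cons, if_pos rfl, pos_cons, if_neg hw]
        constructor
        · rintro ⟨hc, hp⟩
          refine ⟨by split_ifs at hc <;> omega, fun i hi j hj => ?_⟩
          simp only [mem_optL, List.mem_append, List.mem_cons] at hi hj
          rcases hi with ⟨hm, rfl⟩ | hi
          · -- i = lmin: dominated by the pair (s, j) (or by hinv when j = lmax)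
            rcases hj with ⟨hx, rfl⟩ | hj
            · have := hinv hm hx
              split_ifs at hc <;> omega
            · have hge := pos_ge w t (s + 1) j hj
              have := hp s (self_mem_optL_append s _ (by omega)) j (by simp [hj])
              rw [abs_of_neg (by omega : s - j < 0), neg_sub] at this
              rw [abs_of_neg (by omega : i - j < 0), neg_sub]
              omega
          · refine hp i ?_ j ?_
            · simp only [mem_optL, List.mem_append]
              rcases hi with rfl | hi
              · exact Or.inl ⟨by omega, rfl⟩
              · exact Or.inr hi
            · simp only [mem_optL, List.mem_append]
              rcases hj with ⟨hx, rfl⟩ | hj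
              · exact Or.inl ⟨hx, rfl⟩
              · exact Or.inr hj
        · rintro ⟨hc, hp⟩
          have hlx : ¬lmax = -1 → c ≤ s - lmax + 1 := by
            intro hx
            have := hp s (head_mem_append_cons s _ _) lmax (self_mem_optL_append lmax _ hx)
            rwa [abs_of_nonneg (by omega : (0:Int) ≤ s - lmax)] at this
          refine ⟨by split_ifs with h' <;> omega, fun i hi j hj => ?_⟩
          refine hp i ?_ j ?_
          · simp only [mem_optL, List.mem_append, List.mem_cons] at hi ⊢
            rcases hi with ⟨-, rfl⟩ | hi
            · exact Or.inr (Or.inl rfl)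
            · exact Or.inr (Or.inr hi)
          · simp only [mem_optL, List.mem_append] at hj ⊢
            exact hj
      · -- x matches neither: the state is unchanged
        have hstep : stepA w v (lmin, lmax, ans) (s, x) = (lmin, lmax, ans) := by
          simp [stepA, hw, hv]
        rw [hstep,
          ih (s + 1) lmin lmax ans (by omega) (by omega) (by omega) (by omega) hinv]
        rw [pos_cons, if_neg hv, pos_cons, if_neg hw]

-- bridge: A's range-indexed fold is the fold over enumerate
lemma foldA_enum (w v : Int) (A : List Int) (init : Int × Int × Int) :
    (PySem.List.pyRange 0 (PySem.List.len A) 1).foldl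
        (fun st i => stepA w v st (i, PySem.List.pyGetD A i 0)) init
      = (PySem.List.enumerate A 0).foldl (stepA w v) init := by
  rw [PySem.List.enumerate_eq_map_pyRange A 0, List.foldl_map]

-- ===== VERDICT (by name: the statement is the Claim_ definition above) =====
theorem solve_spec : Claim_equal_solve := by
  intro A _ hpre
  unfold Spec_solve
  obtain ⟨x, t, rfl⟩ : ∃ x t, A = x :: t := by
    cases A with
    | nil => exact absurd rfl hpre
    | cons x t => exact ⟨x, t, rfl⟩
  simp only [solve, solve_alt, PySem.List.max?_id_cons, PySem.List.min?_id_cons]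
  rw [foldA_enum]
  unfold posList
  rw [posList_eq, posList_eq]
  set A := x :: t with hAdef
  set w := List.foldl max x t with hw
  set v := List.foldl min x t with hv
  have hA : ∀ c : Int,
      (c ≤ ((PySem.List.enumerate A 0).foldl (stepA w v) (-1, -1, (A.length : Int))).2.2) ↔
        (c ≤ (A.length : Int) ∧ ∀ i ∈ pos v A 0, ∀ j ∈ pos w A 0, c ≤ |i - j| + 1) := by
    intro c
    have := scan_le_iff w v A 0 (-1) (-1) (A.length : Int) c
      (by omega) (by omega) (by omega) (by omega) (by intro h; exact absurd rfl h)
    simpa [optL] using this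
  have hB : ∀ c : Int,
      (c ≤ mergeB (pos v A 0) (pos w A 0) (A.length : Int)) ↔
        (c ≤ (A.length : Int) ∧ ∀ i ∈ pos v A 0, ∀ j ∈ pos w A 0, c ≤ |i - j| + 1) := by
    intro c
    constructor
    · intro h
      refine ⟨le_trans h (mergeB_le_init _ _ _), fun i hi j hj => le_trans h ?_⟩
      exact mergeB_le_pair _ _ _ i j (pos_sorted v A 0) (pos_sorted w A 0) hi hj
    · intro ⟨ha, hb⟩
      exact le_mergeB _ _ _ c ha hb
  have h1 := (hA _).mp le_rfl
  have h2 := (hB _).mp le_rfl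
  exact le_antisymm ((hB _).mpr h1) ((hA _).mpr h2)
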